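-- pv_equiv track=rewrite | github.com/rotfface/Skriptni-Jezici-Apeiron- | cats.py | sphinx_swap
-- ===== SOURCE A (Python) =====
-- def sphinx_swap(start, goal, limit):
-- 	"""Ova funkcija je zapravo ta prava diff_funkcija koja uzima dva
-- 	stringa. Ona vraća minimalni broj karaktera koji se moraju promijeniti
-- 	da bi string start odgovarao stringu goal. Ako stringovi nisu jednake
-- 	dužine razlika dužine se dodaje u total. Ako je broj karaktera koji se
-- 	moraju promijeniti u stringu start veći od limit-a onda ova funkcija
-- 	sphinx_swap treba vratiti bilo koji broj veći od limit-a i treba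
-- 	smanjiti nivo komputacije koji je potreban za pretvaranje u goal na
-- 	minimum.
-- 	"""
--
-- 	if not start:
-- 		return len(goal)
-- 	elif not goal:
-- 		return 0
-- 	elif start[0] != goal[0]:
-- 		return sphinx_swap(start[1:], goal[1:], limit) + 1
-- 	else:
-- 		return sphinx_swap(start[1:], goal[1:], limit)
-- ===== SOURCE B (Python) =====
-- def sphinx_swap(start, goal, limit):
--     mism = sum(1 for a, b in zip(start, goal) if a != b)
--     return mism + max(0, len(goal) - len(start))
-- ===== Notes on version B (the rewrite author's own statement) =====
-- stated objective: faster
-- what changed: Replaced the O(n^2) recursion over string slices by a single linear zip pass counting mismatches plus max(0, len(goal)-len(start)); limit stays an unused parameter.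
import Mathlib
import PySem

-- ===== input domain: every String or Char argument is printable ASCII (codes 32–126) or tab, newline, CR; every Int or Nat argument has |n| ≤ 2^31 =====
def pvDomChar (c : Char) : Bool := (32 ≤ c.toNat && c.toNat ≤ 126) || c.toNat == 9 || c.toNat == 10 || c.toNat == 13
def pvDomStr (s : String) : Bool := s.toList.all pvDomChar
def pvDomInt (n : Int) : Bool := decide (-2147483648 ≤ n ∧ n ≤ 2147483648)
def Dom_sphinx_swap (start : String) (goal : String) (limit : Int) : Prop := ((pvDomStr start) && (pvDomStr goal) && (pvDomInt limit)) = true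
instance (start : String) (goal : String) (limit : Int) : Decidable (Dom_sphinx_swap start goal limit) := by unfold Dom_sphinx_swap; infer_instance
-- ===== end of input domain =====

-- B replaces A's quadratic slice-recursion by one linear zip pass counting mismatches plus max(0, len goal - len start).


-- ===== PORT A =====
-- A's recursion on start[1:], goal[1:], branch order preserved (empty start / empty goal / mismatch / match).
def sphinxSwapRec : List Char → List Char → Int → Int
  | [], g, _ => (g.length : Int)
  | _ :: _, [], _ => 0
  | a :: s, b :: g, limit =>
    if a ≠ b then sphinxSwapRec s g limit + 1 else sphinxSwapRec s g limit

def sphinx_swap (start : String) (goal : String) (limit : Int) : Int :=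
  sphinxSwapRec start.toList goal.toList limit

-- ===== PORT B =====
-- one pass over zip start goal counting mismatches, then add max 0 (len goal - len start)
def sphinx_swap_alt (start : String) (goal : String) (limit : Int) : Int :=
  let mism : Int :=
    (start.toList.zip goal.toList).foldl
      (fun acc p => if p.1 ≠ p.2 then acc + 1 else acc) 0
  mism + max 0 ((goal.toList.length : Int) - (start.toList.length : Int))

-- ===== PRECONDITION & SPEC =====
def Spec_sphinx_swap (start : String) (goal : String) (limit : Int) (out : Int) : Prop := out = sphinx_swap_alt start goal limit
instance (start : String) (goal : String) (limit : Int) (out : Int) : Decidable (Spec_sphinx_swap start goal limit out) := by unfold Spec_sphinx_swap; infer_instance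

-- ===== CLAIM (what is proved, stated in full; the proofs are below) =====
def Claim_equal_sphinx_swap : Prop := ∀ (start : String) (goal : String) (limit : Int), Dom_sphinx_swap start goal limit → Spec_sphinx_swap start goal limit (sphinx_swap start goal limit)

-- ===== LEMMAS AND PROOFS =====

theorem sphinx_foldl_shift (l : List (Char × Char)) (n : Int) :
    l.foldl (fun acc p => if p.1 ≠ p.2 then acc + 1 else acc) n
      = n + l.foldl (fun acc p => if p.1 ≠ p.2 then acc + 1 else acc) 0 := by
  induction l generalizing n with
  | nil => simp
  | cons p t ih =>
    simp only [List.foldl_cons]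
    by_cases h : p.1 = p.2
    · simp only [h, ne_eq, not_true_eq_false, if_false]
      exact ih n
    · simp only [ne_eq, h, not_false_iff, if_true]
      rw [ih (n + 1), ih (0 + 1)]
      ring

theorem sphinx_rec_eq (s g : List Char) (limit : Int) :
    sphinxSwapRec s g limit
      = (s.zip g).foldl (fun acc p => if p.1 ≠ p.2 then acc + 1 else acc) 0
        + max 0 ((g.length : Int) - (s.length : Int)) := by
  induction s generalizing g with
  | nil => simp [sphinxSwapRec]
  | cons a s ih =>
    cases g with
    | nil => simp [sphinxSwapRec]
    | cons b g =>
      simp only [sphinxSwapRec, List.zip_cons_cons, List.foldl_cons, List.length_cons]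
      rw [sphinx_foldl_shift, ih g]
      split_ifs with h <;> omega

-- ===== VERDICT (by name: the statement is the Claim_ definition above) =====
theorem sphinx_swap_spec : Claim_equal_sphinx_swap := by
  intro start goal limit _
  unfold Spec_sphinx_swap sphinx_swap sphinx_swap_alt
  simpa using sphinx_rec_eq start.toList goal.toList limit
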